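-- pv_equiv track=rewrite | github.com/RLUCIOCRUZ1/milkrep | sheets.py | _headers_unicos
-- ===== SOURCE A (Python) =====
-- def _headers_unicos(headers):
--     novos_headers = []
--     contagem = {}
--     for h in headers:
--         if h in contagem:
--             contagem[h] += 1
--             novos_headers.append(f"{h}_{contagem[h]}")
--         else:
--             contagem[h] = 1
--             novos_headers.append(h)
--     return novos_headers
-- ===== SOURCE B (Python) =====
-- def _headers_unicos(headers):
--     headers = list(headers)
--     positions = {}
--     for i, h in enumerate(headers):
--         positions.setdefault(h, []).append(i)
--     out = [""] * len(headers)
--     for h, idxs in positions.items():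
--         for k, i in enumerate(idxs):
--             out[i] = h if k == 0 else f"{h}_{k + 1}"
--     return out
-- ===== Notes on version B (the rewrite author's own statement) =====
-- stated objective: alternative
-- what changed: Replaces A's single streaming pass with running counts by a two-stage group-and-scatter: first build a dict mapping each header to the list of its positions, then fill a preallocated output array group by group, suffixing the k-th occurrence of each header in place.
import Mathlib
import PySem

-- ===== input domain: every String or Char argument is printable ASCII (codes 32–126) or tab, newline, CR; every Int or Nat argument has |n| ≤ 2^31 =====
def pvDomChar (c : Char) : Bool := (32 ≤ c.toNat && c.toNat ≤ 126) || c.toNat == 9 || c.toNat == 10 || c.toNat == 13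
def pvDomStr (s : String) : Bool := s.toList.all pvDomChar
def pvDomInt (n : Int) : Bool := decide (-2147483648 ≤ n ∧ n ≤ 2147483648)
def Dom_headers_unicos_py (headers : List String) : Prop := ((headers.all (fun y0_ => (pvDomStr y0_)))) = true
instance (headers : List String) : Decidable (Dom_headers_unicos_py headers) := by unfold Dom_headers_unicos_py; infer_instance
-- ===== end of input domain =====

-- B replaces A's single streaming pass (running-count dict, append as you go) with a two-stage group-and-scatter: build a positions dict first, then fill a preallocated output array group by group; alternative decomposition, not faster.


-- ===== PORT A =====
-- one loop iteration of A: 'if h in contagem: contagem[h] += 1; append f"{h}_{contagem[h]}" else: contagem[h] = 1; append h'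
def pvStepA (st : List String × PySem.Dict String Int) (h : String) :
    List String × PySem.Dict String Int :=
  if st.2.contains h then
    let v := st.2.getD h 0 + 1
    (st.1 ++ [h ++ "_" ++ PySem.Int.toStr v], st.2.insert h v)
  else
    (st.1 ++ [h], st.2.insert h 1)

def headers_unicos_py (headers : List String) : List String :=
  (headers.foldl pvStepA ([], PySem.Dict.empty)).1

-- ===== PORT B =====
-- stage 1: 'positions.setdefault(h, []).append(i)'  ≡  positions[h] = positions.get(h, []) + [i]  (Dict.modify: exact, incl. insertion order)
-- stage 2: 'out = [""] * len(headers); for h, idxs in positions.items(): for k, i in enumerate(idxs): out[i] = h if k == 0 else f"{h}_{k+1}"'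
--          (the indices i stored in stage 1 come from enumerate, hence are ≥ 0 and in range, so '.toNat' with List.set is exact here)
def headers_unicos_py_alt (headers : List String) : List String :=
  let positions := (PySem.List.enumerate headers 0).foldl
      (fun d p => d.modify p.2 [] (fun l => l ++ [p.1])) PySem.Dict.empty
  let out0 := List.replicate headers.length ""
  positions.items.foldl (fun out g =>
      (PySem.List.enumerate g.2 0).foldl
        (fun out q => out.set q.2.toNat
          (if q.1 = 0 then g.1 else g.1 ++ "_" ++ PySem.Int.toStr (q.1 + 1))) out) out0

-- ===== PRECONDITION & SPEC =====
def Spec_headers_unicos_py (headers : List String) (out : List String) : Prop := out = headers_unicos_py_alt headers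
instance (headers : List String) (out : List String) : Decidable (Spec_headers_unicos_py headers out) := by unfold Spec_headers_unicos_py; infer_instance

-- ===== CLAIM (what is proved, stated in full; the proofs are below) =====
def Claim_equal_headers_unicos_py : Prop := ∀ (headers : List String), Dom_headers_unicos_py headers → Spec_headers_unicos_py headers (headers_unicos_py headers)

-- ===== LEMMAS AND PROOFS =====
-- the value both programs emit at a position whose header is h and whose prefix is 'pre'
def pvVal (pre : List String) (h : String) : String :=
  if pre.count h = 0 then h else h ++ "_" ++ PySem.Int.toStr ((pre.count h : Int) + 1)

-- reference result, one position at a time (the order A emits it in)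
def pvSpec : List String → List String → List String
  | _, [] => []
  | pre, h :: t => pvVal pre h :: pvSpec (pre ++ [h]) t

-- index-indexed form of the reference result
def pvCanon (headers : List String) : List String :=
  (PySem.List.enumerate headers 0).map (fun p =>
    let c := (headers.take p.1.toNat).count p.2
    if c = 0 then p.2 else p.2 ++ "_" ++ PySem.Int.toStr ((c : Int) + 1))

lemma pvA_inv (rest : List String) : ∀ (pre acc : List String) (d : PySem.Dict String Int),
    (∀ h, d.get? h = if pre.count h = 0 then none else some ((pre.count h : Int))) →
    (rest.foldl pvStepA (acc, d)).1 = acc ++ pvSpec pre rest := by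
  induction rest with
  | nil => intro pre acc d _; simp [pvSpec]
  | cons h t ih =>
    intro pre acc d hd
    have hc : d.contains h = decide (pre.count h ≠ 0) := by
      rw [PySem.Dict.contains_eq_isSome_get?, hd h]
      by_cases hz : pre.count h = 0 <;> simp [hz]
    by_cases hz : pre.count h = 0
    · have hstep : pvStepA (acc, d) h = (acc ++ [h], d.insert h 1) := by
        simp [pvStepA, hc, hz]
      simp only [List.foldl_cons, hstep]
      rw [ih (pre ++ [h]) (acc ++ [h]) (d.insert h 1) ?_]
      · simp [pvSpec, pvVal, hz]
      · intro h'
        rw [PySem.Dict.get?_insert]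
        by_cases he : h' = h
        · subst he; simp [List.count_append, hz]
        · have hne : h ≠ h' := fun hh => he hh.symm
          simp [he, hne, hd h', List.count_append]
    · have hg : d.getD h 0 = (pre.count h : Int) := by
        rw [PySem.Dict.getD_eq_get?_getD, hd h]; simp [hz]
      have hstep : pvStepA (acc, d) h =
          (acc ++ [h ++ "_" ++ PySem.Int.toStr ((pre.count h : Int) + 1)],
           d.insert h ((pre.count h : Int) + 1)) := by
        simp [pvStepA, hc, hz, hg]
      simp only [List.foldl_cons, hstep]
      rw [ih (pre ++ [h]) _ _ ?_]
      · simp [pvSpec, pvVal, hz]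
      · intro h'
        rw [PySem.Dict.get?_insert]
        by_cases he : h' = h
        · subst he; simp [List.count_append]
        · have hne : h ≠ h' := fun hh => he hh.symm
          simp [he, hne, hd h', List.count_append]

lemma pvCanon_inv (rest : List String) : ∀ (pre : List String),
    (PySem.List.enumerate rest (pre.length : Int)).map (fun p =>
      let c := ((pre ++ rest).take p.1.toNat).count p.2
      if c = 0 then p.2 else p.2 ++ "_" ++ PySem.Int.toStr ((c : Int) + 1))
    = pvSpec pre rest := by
  induction rest with
  | nil => intro pre; simp [pvSpec, PySem.List.enumerate_nil]
  | cons h t ih =>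
    intro pre
    rw [PySem.List.enumerate_cons, List.map_cons, pvSpec]
    congr 1
    · simp [pvVal]
    · have h1 : (pre.length : Int) + 1 = ((pre ++ [h]).length : Int) := by simp
      have h2 : pre ++ h :: t = (pre ++ [h]) ++ t := by simp
      rw [h1, h2]
      exact ih (pre ++ [h])

lemma pvCanon_eq_spec (headers : List String) : pvCanon headers = pvSpec [] headers := by
  have := pvCanon_inv headers []
  simpa [pvCanon] using this

lemma pvCanon_length (headers : List String) : (pvCanon headers).length = headers.length := by
  simp [pvCanon, PySem.List.length_enumerate]

def pvOcc (h : String) : List String → List Nat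
  | [] => []
  | x :: t => (if x = h then [0] else []) ++ (pvOcc h t).map (· + 1)

lemma pvOcc_cons (h x : String) (t : List String) :
    pvOcc h (x :: t) = (if x = h then [0] else []) ++ (pvOcc h t).map (· + 1) := rfl

lemma pvMapShift (l : List Nat) (s : Nat) :
    (l.map (· + 1)).map (fun j => Int.ofNat (s + j)) = l.map (fun j => Int.ofNat (s + 1 + j)) := by
  rw [List.map_map]
  apply List.map_congr_left
  intro a _
  simp only [Function.comp_apply, Int.ofNat_eq_natCast]
  omega

lemma pvIdx_eq (hs : List String) : ∀ (s : Nat) (h : String),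
    ((PySem.List.enumerate hs (s : Int)).filter (fun p => p.2 == h)).map (·.1)
    = (pvOcc h hs).map (fun j => Int.ofNat (s + j)) := by
  induction hs with
  | nil => intro s h; simp [PySem.List.enumerate_nil, pvOcc]
  | cons x t ih =>
    intro s h
    rw [PySem.List.enumerate_cons]
    have hcast : (s : Int) + 1 = ((s + 1 : Nat) : Int) := by push_cast; ring
    by_cases hx : x = h
    · have hbx : (x == h) = true := by simp [hx]
      rw [List.filter_cons, hbx, if_pos rfl, List.map_cons, hcast, ih,
        pvOcc_cons, if_pos hx, List.cons_append, List.nil_append, List.map_cons, pvMapShift]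
      congr 1
    · have hbx : (x == h) = false := by simp [hx]
      rw [List.filter_cons, hbx]
      simp only [Bool.false_eq_true, if_false]
      rw [hcast, ih, pvOcc_cons, if_neg hx, List.nil_append, pvMapShift]

lemma pvOcc_spec (hs : List String) : ∀ (h : String) (k j : Nat),
    (pvOcc h hs)[k]? = some j →
    ∃ hj : j < hs.length, hs[j] = h ∧ (hs.take j).count h = k := by
  induction hs with
  | nil => intro h k j hk; simp [pvOcc] at hk
  | cons x t ih =>
    intro h k j hk
    by_cases hx : x = h
    · rw [pvOcc_cons, if_pos hx, List.cons_append, List.nil_append] at hk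
      match k with
      | 0 =>
        simp at hk
        subst hk
        exact ⟨by simp, by simp [hx], by simp⟩
      | k + 1 =>
        rw [List.getElem?_cons_succ, List.getElem?_map] at hk
        obtain ⟨j', hj', hjj⟩ := Option.map_eq_some_iff.mp hk
        obtain ⟨hlt, hget, hcnt⟩ := ih h k j' hj'
        have hjeq : j = j' + 1 := hjj.symm
        subst hjeq
        refine ⟨by simp only [List.length_cons]; omega, ?_, ?_⟩
        · simpa using hget
        · simp [List.take_succ_cons, hx, hcnt]
    · rw [pvOcc_cons, if_neg hx, List.nil_append, List.getElem?_map] at hk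
      obtain ⟨j', hj', hjj⟩ := Option.map_eq_some_iff.mp hk
      obtain ⟨hlt, hget, hcnt⟩ := ih h k j' hj'
      have hjeq : j = j' + 1 := hjj.symm
      subst hjeq
      refine ⟨by simp only [List.length_cons]; omega, ?_, ?_⟩
      · simpa using hget
      · simp [List.take_succ_cons, hx, hcnt]

lemma pvOcc_mem (hs : List String) : ∀ (h : String) (j : Nat),
    j ∈ pvOcc h hs ↔ ∃ hj : j < hs.length, hs[j] = h := by
  induction hs with
  | nil => intro h j; simp [pvOcc]
  | cons x t ih =>
    intro h j
    rw [pvOcc_cons, List.mem_append]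
    constructor
    · rintro (hl | hr)
      · by_cases hxh : x = h
        · rw [if_pos hxh, List.mem_singleton] at hl
          subst hl
          exact ⟨by simp, by simpa using hxh⟩
        · rw [if_neg hxh] at hl; simp at hl
      · obtain ⟨j', hj', hjj⟩ := List.mem_map.mp hr
        obtain ⟨hlt, hget⟩ := (ih h j').mp hj'
        subst hjj
        exact ⟨by simp only [List.length_cons]; omega, by simpa using hget⟩
    · rintro ⟨hj, hget⟩
      match j with
      | 0 =>
        left
        simp only [List.getElem_cons_zero] at hget
        rw [if_pos hget]
        simp
      | j + 1 =>
        right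
        exact List.mem_map.mpr ⟨j, (ih h j).mpr ⟨by simp at hj; omega, by simpa using hget⟩, rfl⟩

def pvIdxInt (h : String) (hs : List String) : List Int :=
  (pvOcc h hs).map (fun j => Int.ofNat j)

lemma pvIdxInt_eq (hs : List String) (h : String) :
    ((PySem.List.enumerate hs 0).filter (fun p => p.2 == h)).map (·.1) = pvIdxInt h hs := by
  have h0 : (0 : Int) = ((0 : Nat) : Int) := rfl
  rw [h0, pvIdx_eq hs 0 h, pvIdxInt]
  apply List.map_congr_left
  intro a _
  simp

lemma pvWritesLen (v : Int × Int → String) (ps : List (Int × Int)) :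
    ∀ (out : List String),
    (ps.foldl (fun o q => o.set q.2.toNat (v q)) out).length = out.length := by
  induction ps with
  | nil => intro out; rfl
  | cons q t ih => intro out; simp [ih, List.length_set]

lemma pvWrites (cv : List String) (v : Int × Int → String) (ps : List (Int × Int))
    (hv : ∀ q ∈ ps, q.2.toNat < cv.length ∧ v q = cv[q.2.toNat]!) :
    ∀ (out : List String), out.length = cv.length →
    ∀ (j : Nat),
    (ps.foldl (fun o q => o.set q.2.toNat (v q)) out)[j]? =
      if j ∈ ps.map (fun q => q.2.toNat) then cv[j]? else out[j]? := by
  induction ps with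
  | nil => intro out _ j; simp
  | cons q t ih =>
    intro out hlen j
    simp only [List.foldl_cons]
    have hq := hv q (List.mem_cons_self ..)
    have hset : (out.set q.2.toNat (v q))[j]? =
        if q.2.toNat = j then cv[j]? else out[j]? := by
      rw [List.getElem?_set]
      by_cases hej : q.2.toNat = j
      · subst hej
        have hjl : q.2.toNat < out.length := hlen ▸ hq.1
        rw [if_pos rfl, if_pos rfl, if_pos hjl, hq.2, List.getElem!_eq_getElem?_getD,
            List.getElem?_eq_getElem hq.1]
        simp
      · rw [if_neg hej, if_neg hej]
    rw [ih (fun q hmem => hv q (List.mem_cons_of_mem _ hmem)) _ (by simp [hlen]) j]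
    by_cases hmem : j ∈ t.map (fun q => q.2.toNat)
    · have : j ∈ (q :: t).map (fun q => q.2.toNat) := by
        simp only [List.map_cons, List.mem_cons]; right; exact hmem
      rw [if_pos hmem, if_pos this]
    · rw [if_neg hmem, hset]
      by_cases hej : q.2.toNat = j
      · have : j ∈ (q :: t).map (fun q => q.2.toNat) := by
          simp only [List.map_cons, List.mem_cons]; left; exact hej.symm
        rw [if_pos hej, if_pos this]
      · have : ¬ j ∈ (q :: t).map (fun q => q.2.toNat) := by
          simp only [List.map_cons, List.mem_cons]
          rintro (h1 | h2)
          · exact hej h1.symm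
          · exact hmem h2
        rw [if_neg hej, if_neg this]

lemma pvCanon_at_occ (headers : List String) (h : String) (k j : Nat)
    (hk : (pvOcc h headers)[k]? = some j) :
    (pvCanon headers)[j]! = if k = 0 then h else h ++ "_" ++ PySem.Int.toStr ((k : Int) + 1) := by
  obtain ⟨hj, hget, hcnt⟩ := pvOcc_spec headers h k j hk
  have hjc : j < (pvCanon headers).length := by rw [pvCanon_length]; exact hj
  rw [List.getElem!_eq_getElem?_getD, List.getElem?_eq_getElem hjc]
  simp only [Option.getD_some, pvCanon]
  rw [List.getElem_map, PySem.List.getElem_enumerate]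
  simp only [Int.zero_add]
  rw [Int.toNat_natCast, hget, hcnt]

lemma pvInner (headers : List String) (h : String) (out : List String)
    (hlen : out.length = headers.length) (j : Nat) :
    ((PySem.List.enumerate (pvIdxInt h headers) 0).foldl
      (fun out q => out.set q.2.toNat
        (if q.1 = 0 then h else h ++ "_" ++ PySem.Int.toStr (q.1 + 1))) out)[j]? =
      if j ∈ pvOcc h headers then (pvCanon headers)[j]? else out[j]? := by
  have hlenc : out.length = (pvCanon headers).length := by rw [pvCanon_length]; exact hlen
  have hv : ∀ q ∈ PySem.List.enumerate (pvIdxInt h headers) 0,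
      q.2.toNat < (pvCanon headers).length ∧
      (if q.1 = 0 then h else h ++ "_" ++ PySem.Int.toStr (q.1 + 1)) = (pvCanon headers)[q.2.toNat]! := by
    intro q hq
    rw [PySem.List.mem_enumerate_iff] at hq
    obtain ⟨k, hk, hq⟩ := hq
    subst hq
    have hkocc : k < (pvOcc h headers).length := by
      simpa [pvIdxInt] using hk
    have hkk : (pvOcc h headers)[k]? = some ((pvOcc h headers)[k]'hkocc) :=
      List.getElem?_eq_getElem hkocc
    obtain ⟨hjl, _, _⟩ := pvOcc_spec headers h k _ hkk
    have hval : (pvIdxInt h headers)[k]'hk = Int.ofNat ((pvOcc h headers)[k]'hkocc) := by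
      simp [pvIdxInt]
    constructor
    · rw [hval]
      simpa [pvCanon_length, Int.ofNat_eq_natCast, Int.toNat_natCast] using hjl
    · rw [hval]
      simp only [Int.ofNat_eq_natCast, Int.toNat_natCast]
      rw [pvCanon_at_occ headers h k _ hkk]
      simp only [Int.zero_add]
      by_cases hk0 : k = 0 <;> simp [hk0]
  have hw := pvWrites (pvCanon headers) _ _ hv out hlenc j
  rw [hw]
  have hmm : (PySem.List.enumerate (pvIdxInt h headers) 0).map
      (fun q => q.2.toNat) = pvOcc h headers := by
    have h1 : (fun (q : Int × Int) => q.2.toNat) = Int.toNat ∘ (fun (q : Int × Int) => q.2) := rfl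
    rw [h1, ← List.map_map, PySem.List.map_snd_enumerate, pvIdxInt, List.map_map]
    have : Int.toNat ∘ (fun j => Int.ofNat j) = id := by
      funext a; simp
    rw [this, List.map_id]
  rw [hmm]

lemma pvOuter (headers : List String) (K : List String) :
    ∀ (out : List String), out.length = headers.length →
    ∀ (j : Nat),
      ((K.map (fun h => (h, pvIdxInt h headers))).foldl
        (fun out g => (PySem.List.enumerate g.2 0).foldl
          (fun out q => out.set q.2.toNat
            (if q.1 = 0 then g.1 else g.1 ++ "_" ++ PySem.Int.toStr (q.1 + 1))) out) out)[j]? =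
      if ∃ hj : j < headers.length, headers[j] ∈ K then (pvCanon headers)[j]? else out[j]? := by
  induction K with
  | nil =>
    intro out hlen j
    simp only [List.map_nil, List.foldl_nil]
    rw [if_neg (by rintro ⟨hj, hmem⟩; simp at hmem)]
  | cons h K ih =>
    intro out hlen j
    simp only [List.map_cons, List.foldl_cons]
    have hlen' : ((PySem.List.enumerate (pvIdxInt h headers) 0).foldl
        (fun out q => out.set q.2.toNat
          (if q.1 = 0 then h else h ++ "_" ++ PySem.Int.toStr (q.1 + 1))) out).length
        = headers.length := by
      rw [pvWritesLen]; exact hlen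
    rw [ih _ hlen' j]
    by_cases hmem : ∃ hj : j < headers.length, headers[j] ∈ K
    · obtain ⟨hj, hK⟩ := hmem
      rw [if_pos ⟨hj, hK⟩, if_pos ⟨hj, List.mem_cons_of_mem _ hK⟩]
    · rw [if_neg hmem, pvInner headers h out hlen j]
      by_cases hocc : j ∈ pvOcc h headers
      · obtain ⟨hj, hget⟩ := (pvOcc_mem headers h j).mp hocc
        rw [if_pos hocc, if_pos ⟨hj, by rw [hget]; exact List.mem_cons_self ..⟩]
      · rw [if_neg hocc]
        by_cases hcons : ∃ hj : j < headers.length, headers[j] ∈ h :: K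
        · obtain ⟨hj, hK⟩ := hcons
          rcases List.mem_cons.mp hK with heq | hK'
          · exact absurd ((pvOcc_mem headers h j).mpr ⟨hj, heq⟩) hocc
          · exact absurd ⟨hj, hK'⟩ hmem
        · rw [if_neg hcons]

lemma pvPositions_items (headers : List String) :
    ((PySem.List.enumerate headers 0).foldl
      (fun d p => d.modify p.2 [] (fun l => l ++ [p.1])) PySem.Dict.empty).items
    = (PySem.Set.ofList headers).map (fun h => (h, pvIdxInt h headers)) := by
  have hnodup : ((PySem.List.enumerate headers 0).foldl
      (fun d p => d.modify p.2 [] (fun l => l ++ [p.1]))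
      (PySem.Dict.empty : PySem.Dict String (List Int))).keys.Nodup :=
    PySem.Dict.nodup_keys_foldl_modify_key (PySem.List.enumerate headers 0) (fun p => p.2) []
      (fun d p => fun l => l ++ [p.1]) PySem.Dict.empty PySem.Dict.nodup_keys_empty
  have hkeys : ((PySem.List.enumerate headers 0).foldl
      (fun d p => d.modify p.2 [] (fun l => l ++ [p.1]))
      (PySem.Dict.empty : PySem.Dict String (List Int))).keys = PySem.Set.ofList headers := by
    rw [PySem.Dict.keys_foldl_modify_key, PySem.List.map_snd_enumerate]
    rfl
  have hgetD : ∀ c0, ((PySem.List.enumerate headers 0).foldl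
      (fun d p => d.modify p.2 [] (fun l => l ++ [p.1]))
      (PySem.Dict.empty : PySem.Dict String (List Int))).getD c0 [] = pvIdxInt c0 headers := by
    intro c0
    have hswap : (PySem.List.enumerate headers 0).foldl
        (fun d p => d.modify p.2 [] (fun l => l ++ [p.1]))
        (PySem.Dict.empty : PySem.Dict String (List Int))
        = ((PySem.List.enumerate headers 0).map Prod.swap).foldl
        (fun d p => d.modify p.1 [] (fun l => l ++ [p.2])) PySem.Dict.empty := by
      rw [List.foldl_map]
      rfl
    rw [hswap, PySem.Dict.getD_foldl_modify_append, PySem.Dict.getD_empty, List.nil_append,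
      List.filter_map, List.map_map]
    have hfc : ((fun (p : String × Int) => p.1 == c0) ∘ Prod.swap)
        = (fun (p : Int × String) => p.2 == c0) := rfl
    have hmc : ((fun (p : String × Int) => p.2) ∘ Prod.swap)
        = (fun (p : Int × String) => p.1) := rfl
    rw [hfc, hmc, pvIdxInt_eq]
  rw [PySem.Dict.items_eq_map_keys _ hnodup [], hkeys]
  apply List.map_congr_left
  intro h _
  rw [hgetD h]

lemma pvAlt_eq_canon (headers : List String) :
    headers_unicos_py_alt headers = pvCanon headers := by
  unfold headers_unicos_py_alt
  simp only
  rw [pvPositions_items headers]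
  apply List.ext_getElem?
  intro j
  rw [pvOuter headers (PySem.Set.ofList headers) (List.replicate headers.length "")
    List.length_replicate j]
  by_cases hj : j < headers.length
  · rw [if_pos ⟨hj, (PySem.Set.mem_ofList headers headers[j]).mpr (List.getElem_mem hj)⟩]
  · rw [if_neg (by rintro ⟨hjl, _⟩; exact hj hjl)]
    rw [List.getElem?_eq_none (by simpa using Nat.le_of_not_lt hj),
        List.getElem?_eq_none (by rw [pvCanon_length]; exact Nat.le_of_not_lt hj)]

-- ===== VERDICT (by name: the statement is the Claim_ definition above) =====
theorem headers_unicos_py_spec : Claim_equal_headers_unicos_py := by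
  intro headers _
  unfold Spec_headers_unicos_py headers_unicos_py
  rw [pvA_inv headers [] [] PySem.Dict.empty (by simp [PySem.Dict.get?_empty])]
  rw [pvAlt_eq_canon, pvCanon_eq_spec]
  simp
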